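-- pv_equiv track=rewrite | github.com/SM-sandbox/ragas | scripts/generate_checkpoint_report.py | get_breakdown_by_type
-- ===== SOURCE A (Python) =====
-- from collections import defaultdict
--
-- def get_breakdown_by_type(results: list) -> dict:
--     """Get pass/fail breakdown by question type."""
--     by_type = defaultdict(lambda: {"total": 0, "pass": 0, "partial": 0, "fail": 0})
--
--     for r in results:
--         qtype = "single-hop" if r.get("question_type", "").startswith("sh") else "multi-hop"
--         verdict = r.get("verdict", "").lower()
--         by_type[qtype]["total"] += 1
--         if verdict == "pass":
--             by_type[qtype]["pass"] += 1
--         elif verdict == "partial":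
--             by_type[qtype]["partial"] += 1
--         elif verdict == "fail":
--             by_type[qtype]["fail"] += 1
--
--     return dict(by_type)
-- ===== SOURCE B (Python) =====
-- from collections import Counter
--
--
-- def get_breakdown_by_type(results: list) -> dict:
--     """Get pass/fail breakdown by question type (one pass of Counters, no inline branching)."""
--     qtypes = ["single-hop" if r.get("question_type", "").startswith("sh") else "multi-hop"
--               for r in results]
--     totals = Counter(qtypes)
--     counts = Counter(zip(qtypes, (r.get("verdict", "").lower() for r in results)))
--     return {q: {"total": t,
--                 "pass": counts[(q, "pass")],
--                 "partial": counts[(q, "partial")],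
--                 "fail": counts[(q, "fail")]}
--             for q, t in totals.items()}
-- ===== Notes on version B (the rewrite author's own statement) =====
-- stated objective: alternative
-- what changed: Replaces the defaultdict with inline verdict branching and in-place increments by a branch-free pipeline: map each row to its qtype, build two Counters (qtype totals and (qtype, verdict) pairs), then assemble the per-type records in a comprehension over the totals.
import Mathlib
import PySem

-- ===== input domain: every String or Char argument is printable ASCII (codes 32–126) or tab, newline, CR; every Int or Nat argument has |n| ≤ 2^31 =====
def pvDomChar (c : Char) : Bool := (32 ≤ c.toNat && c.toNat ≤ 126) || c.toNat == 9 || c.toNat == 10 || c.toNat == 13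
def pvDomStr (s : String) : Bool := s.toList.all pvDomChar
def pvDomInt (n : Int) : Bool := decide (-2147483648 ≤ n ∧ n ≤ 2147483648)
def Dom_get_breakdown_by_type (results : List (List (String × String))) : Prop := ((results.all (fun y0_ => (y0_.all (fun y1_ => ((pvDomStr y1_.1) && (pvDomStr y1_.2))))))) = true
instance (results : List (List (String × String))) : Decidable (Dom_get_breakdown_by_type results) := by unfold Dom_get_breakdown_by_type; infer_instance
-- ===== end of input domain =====

-- B replaces A's defaultdict-with-inline-verdict-branching loop by two branch-free Counters
-- (qtype totals and (qtype, verdict) pairs) assembled afterwards; objective: alternative.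

-- ===== PORT A =====
def get_breakdown_by_type (results : List (List (String × String))) : List (String × List (String × Int)) :=
  (results.foldl (fun d r =>
      let qtype : String :=
        if PySem.Str.startswith ((PySem.Dict.mk r).getD "question_type" "") "sh"
        then "single-hop" else "multi-hop"
      let verdict := PySem.Str.lower ((PySem.Dict.mk r).getD "verdict" "")
      let cur := d.getD qtype (PySem.Dict.mk [("total", (0 : Int)), ("pass", 0), ("partial", 0), ("fail", 0)])
      let cur := cur.modify "total" 0 (· + 1)
      let cur :=
        if verdict == "pass" then cur.modify "pass" 0 (· + 1)
        else if verdict == "partial" then cur.modify "partial" 0 (· + 1)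
        else if verdict == "fail" then cur.modify "fail" 0 (· + 1)
        else cur
      d.insert qtype cur)
    (PySem.Dict.empty : PySem.Dict String (PySem.Dict String Int))).items.map
    (fun p => (p.1, p.2.items))

-- ===== PORT B =====
def get_breakdown_by_type_alt (results : List (List (String × String))) : List (String × List (String × Int)) :=
  let qtypes := results.map (fun r =>
    if PySem.Str.startswith ((PySem.Dict.mk r).getD "question_type" "") "sh"
    then "single-hop" else "multi-hop")
  let totals := PySem.Dict.counter qtypes
  let counts := PySem.Dict.counter
    (List.zip qtypes (results.map (fun r => PySem.Str.lower ((PySem.Dict.mk r).getD "verdict" ""))))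
  totals.items.map (fun p =>
    (p.1, [("total", p.2),
           ("pass", counts.getD (p.1, "pass") 0),
           ("partial", counts.getD (p.1, "partial") 0),
           ("fail", counts.getD (p.1, "fail") 0)]))

-- ===== PRECONDITION & SPEC =====
def Spec_get_breakdown_by_type (results : List (List (String × String))) (out : List (String × List (String × Int))) : Prop := out = get_breakdown_by_type_alt results
instance (results : List (List (String × String))) (out : List (String × List (String × Int))) : Decidable (Spec_get_breakdown_by_type results out) := by unfold Spec_get_breakdown_by_type; infer_instance

-- ===== CLAIM (what is proved, stated in full; the proofs are below) =====
def Claim_equal_get_breakdown_by_type : Prop := ∀ (results : List (List (String × String))), Dom_get_breakdown_by_type results → Spec_get_breakdown_by_type results (get_breakdown_by_type results)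

-- ===== LEMMAS AND PROOFS =====

-- the qtype and the lowercased verdict of one row
def pvF (r : List (String × String)) : String :=
  if PySem.Str.startswith ((PySem.Dict.mk r).getD "question_type" "") "sh"
  then "single-hop" else "multi-hop"

def pvG (r : List (String × String)) : String :=
  PySem.Str.lower ((PySem.Dict.mk r).getD "verdict" "")

def pvZero : PySem.Dict String Int :=
  PySem.Dict.mk [("total", 0), ("pass", 0), ("partial", 0), ("fail", 0)]

-- A's inner update of one per-type record
def pvUpd (v : String) (d : PySem.Dict String Int) : PySem.Dict String Int :=
  let cur := d.modify "total" 0 (· + 1)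
  if v == "pass" then cur.modify "pass" 0 (· + 1)
  else if v == "partial" then cur.modify "partial" 0 (· + 1)
  else if v == "fail" then cur.modify "fail" 0 (· + 1)
  else cur

-- A's fold step (definitionally the step lambda of the port of A)
def pvStepA (d : PySem.Dict String (PySem.Dict String Int)) (r : List (String × String)) :
    PySem.Dict String (PySem.Dict String Int) :=
  d.insert (pvF r) (pvUpd (pvG r) (d.getD (pvF r) pvZero))

-- the canonical per-type record after processing l
def pvRec (l : List (List (String × String))) (q : String) : PySem.Dict String Int :=
  PySem.Dict.mk [("total", ((l.map pvF).count q : Int)),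
                 ("pass", ((List.zip (l.map pvF) (l.map pvG)).count (q, "pass") : Int)),
                 ("partial", ((List.zip (l.map pvF) (l.map pvG)).count (q, "partial") : Int)),
                 ("fail", ((List.zip (l.map pvF) (l.map pvG)).count (q, "fail") : Int))]

-- the canonical value of A's fold state
def pvState (l : List (List (String × String))) : PySem.Dict String (PySem.Dict String Int) :=
  PySem.Dict.mk ((PySem.Set.ofList (l.map pvF)).map (fun q => (q, pvRec l q)))

theorem pvUpd_eq (v : String) (a b c e : Int) :
    pvUpd v (PySem.Dict.mk [("total", a), ("pass", b), ("partial", c), ("fail", e)]) =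
      PySem.Dict.mk [("total", a + 1),
                     ("pass", b + if v = "pass" then 1 else 0),
                     ("partial", c + if v = "partial" then 1 else 0),
                     ("fail", e + if v = "fail" then 1 else 0)] := by
  unfold pvUpd
  by_cases h1 : v = "pass"
  · subst h1
    simp [PySem.Dict.modify, PySem.Dict.insert, PySem.Dict.getD, PySem.Dict.get?, PySem.Dict.contains]
  · by_cases h2 : v = "partial"
    · subst h2
      simp [PySem.Dict.modify, PySem.Dict.insert, PySem.Dict.getD, PySem.Dict.get?, PySem.Dict.contains]
    · by_cases h3 : v = "fail"
      · subst h3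
        simp [PySem.Dict.modify, PySem.Dict.insert, PySem.Dict.getD, PySem.Dict.get?, PySem.Dict.contains]
      · simp only [beq_iff_eq, h1, h2, h3, if_false, add_zero]
        simp [PySem.Dict.modify, PySem.Dict.insert, PySem.Dict.getD, PySem.Dict.get?, PySem.Dict.contains]

theorem pvRec_append_ne (l : List (List (String × String))) (r : List (String × String))
    (q' : String) (h : pvF r ≠ q') : pvRec (l ++ [r]) q' = pvRec l q' := by
  unfold pvRec
  rw [List.map_append, List.map_append, List.zip_append (by simp)]
  simp [List.count_append, Prod.mk.injEq, h]

theorem pvRec_append_self (l : List (List (String × String))) (r : List (String × String)) :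
    pvRec (l ++ [r]) (pvF r) =
      PySem.Dict.mk
        [("total", ((l.map pvF).count (pvF r) : Int) + 1),
         ("pass", ((List.zip (l.map pvF) (l.map pvG)).count (pvF r, "pass") : Int) +
            if pvG r = "pass" then 1 else 0),
         ("partial", ((List.zip (l.map pvF) (l.map pvG)).count (pvF r, "partial") : Int) +
            if pvG r = "partial" then 1 else 0),
         ("fail", ((List.zip (l.map pvF) (l.map pvG)).count (pvF r, "fail") : Int) +
            if pvG r = "fail" then 1 else 0)] := by
  unfold pvRec
  rw [List.map_append, List.map_append, List.zip_append (by simp)]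
  simp [List.count_append, List.count_cons, Prod.mk.injEq, Nat.cast_ite]

theorem pvRec_zero (l : List (List (String × String))) (q : String) (h : q ∉ l.map pvF) :
    pvRec l q = pvZero := by
  have h1 : (l.map pvF).count q = 0 := List.count_eq_zero.mpr h
  have h2 : ∀ x : String, (List.zip (l.map pvF) (l.map pvG)).count (q, x) = 0 := fun x =>
    List.count_eq_zero.mpr (fun hm => h (List.of_mem_zip hm).1)
  unfold pvRec pvZero
  rw [h1, h2, h2, h2]
  norm_num

theorem pvUpd_rec (l : List (List (String × String))) (r : List (String × String)) :
    pvUpd (pvG r) (pvRec l (pvF r)) = pvRec (l ++ [r]) (pvF r) := by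
  rw [pvRec_append_self]
  exact pvUpd_eq _ _ _ _ _

theorem pvStep_state (l : List (List (String × String))) (r : List (String × String)) :
    pvStepA (pvState l) r = pvState (l ++ [r]) := by
  have hcomp : ((fun x : String × PySem.Dict String Int => x.1) ∘ fun q => (q, pvRec l q)) =
      fun q => q := rfl
  have hkeys : (pvState l).keys = PySem.Set.ofList (l.map pvF) := by
    simp only [pvState, PySem.Dict.keys, List.map_map]
    rw [hcomp]
    simp
  have hnd : (pvState l).keys.Nodup := by
    rw [hkeys]; exact PySem.Set.nodup_ofList _
  have hS : (l ++ [r]).map pvF = l.map pvF ++ [pvF r] := by simp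
  by_cases hmem : pvF r ∈ PySem.Set.ofList (l.map pvF)
  · have hcont : (pvState l).contains (pvF r) = true := by
      rw [PySem.Dict.contains_iff_mem_keys, hkeys]; exact hmem
    have hget : (pvState l).getD (pvF r) pvZero = pvRec l (pvF r) := by
      have hmemit : (pvF r, pvRec l (pvF r)) ∈ (pvState l).items :=
        List.mem_map_of_mem (f := fun q => (q, pvRec l q)) hmem
      exact PySem.Dict.getD_of_mem_items _ hmemit hnd _
    show (pvState l).insert (pvF r) (pvUpd (pvG r) ((pvState l).getD (pvF r) pvZero)) = _
    rw [hget, pvUpd_rec]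
    apply PySem.Dict.ext
    rw [PySem.Dict.items_insert, hcont, if_pos rfl]
    simp only [pvState]
    rw [hS, PySem.Set.ofList_append_singleton, PySem.Set.add_of_mem hmem, List.map_map]
    apply List.map_congr_left
    intro q' hq'
    by_cases h' : q' = pvF r
    · subst h'; simp
    · simp [Function.comp, h', pvRec_append_ne l r q' (Ne.symm h')]
  · have hcont : (pvState l).contains (pvF r) = false := by
      apply Bool.eq_false_iff.mpr
      intro hc
      exact hmem (hkeys ▸ (PySem.Dict.contains_iff_mem_keys _ _).mp hc)
    have hmem' : pvF r ∉ l.map pvF := fun h => hmem ((PySem.Set.mem_ofList _ _).mpr h)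
    have hget : (pvState l).getD (pvF r) pvZero = pvZero :=
      PySem.Dict.getD_of_not_contains _ _ hcont
    show (pvState l).insert (pvF r) (pvUpd (pvG r) ((pvState l).getD (pvF r) pvZero)) = _
    rw [hget, ← pvRec_zero l (pvF r) hmem', pvUpd_rec]
    apply PySem.Dict.ext
    rw [PySem.Dict.items_insert, hcont, if_neg (by simp)]
    simp only [pvState]
    rw [hS, PySem.Set.ofList_append_singleton, PySem.Set.add_of_not_mem hmem, List.map_append]
    congr 1
    apply List.map_congr_left
    intro q' hq'
    have h' : pvF r ≠ q' := fun he => hmem (he ▸ hq')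
    rw [pvRec_append_ne l r q' h']

theorem pvState_spec (l : List (List (String × String))) :
    l.foldl pvStepA PySem.Dict.empty = pvState l := by
  induction l using List.reverseRecOn with
  | nil => rfl
  | append_singleton l r ih =>
    rw [List.foldl_append]
    simp only [List.foldl]
    rw [ih]
    exact pvStep_state l r

-- ===== VERDICT (by name: the statement is the Claim_ definition above) =====
theorem get_breakdown_by_type_spec : Claim_equal_get_breakdown_by_type := by
  intro results _
  show get_breakdown_by_type results = get_breakdown_by_type_alt results
  have hA : get_breakdown_by_type results =
      (results.foldl pvStepA PySem.Dict.empty).items.map (fun p => (p.1, p.2.items)) := rfl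
  have hF : (fun r => if PySem.Str.startswith ((PySem.Dict.mk r).getD "question_type" "") "sh"
      then "single-hop" else "multi-hop") = pvF := rfl
  have hG : (fun r : List (String × String) =>
      PySem.Str.lower ((PySem.Dict.mk r).getD "verdict" "")) = pvG := rfl
  rw [hA, pvState_spec]
  simp only [get_breakdown_by_type_alt, pvState]
  rw [hF, hG, PySem.Dict.items_counter, List.map_map, List.map_map]
  apply List.map_congr_left
  intro q hq
  simp [Function.comp, pvRec, PySem.Dict.getD_counter]
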